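-- pv_equiv track=rewrite | github.com/saadbutt32/Conversion-of-Pakistan-Sign-Languag-into-Text-and-Speech-using-OpenPose-and-Machine-Learning | normalize.py | move_to_wrist
-- ===== SOURCE A (Python) =====
-- def move_to_wrist(handRight,wristX,wristY):
--     refX = wristX
--     refY= wristY
--
--     handRightResults = []
--     handRightPoints = []
--     handRightX = []
--     handRightY = []
--
--     for x in range(0,len(handRight),2):
--         handRightX.append(handRight[x])
--     for x in range(1,len(handRight),2):
--         handRightY.append(handRight[x])
--
--     p1 = [handRightX[0], handRightY[0]]
--     p2 = [refX, refY]
--     distanceX = p1[0]-p2[0]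
--     distanceY = p1[1]-p2[1]
--
--     for x in range(len(handRightX)):
--         handRightX[x] -= distanceX
--
--     for x in range(len(handRightY)):
--         handRightY[x] -= distanceY
--
--     # storing computed keypoints
--     for x in range(len(handRightX)):
--         handRightPoints.append((int(handRightX[x]) , int(handRightY[x])))
--         handRightResults.append(handRightX[x])
--         handRightResults.append(handRightY[x])
--
--     return handRightResults,handRightPoints
-- ===== SOURCE B (Python) =====
-- def move_to_wrist(handRight, wristX, wristY):
--     dx = handRight[0] - wristX
--     dy = handRight[1] - wristY
--     handRightResults = []
--     handRightPoints = []
--     for i in range(0, len(handRight), 2):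
--         nx = handRight[i] - dx
--         ny = handRight[i + 1] - dy
--         handRightResults.append(nx)
--         handRightResults.append(ny)
--         handRightPoints.append((int(nx), int(ny)))
--     return handRightResults, handRightPoints
-- ===== Notes on version B (the rewrite author's own statement) =====
-- stated objective: simpler
-- what changed: B computes the wrist offset once from handRight[0]/handRight[1] and does a single pair-wise pass over consecutive indices, instead of A's five passes (split into X/Y coordinate lists, two in-place subtraction loops, then a recombination loop).
import Mathlib
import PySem

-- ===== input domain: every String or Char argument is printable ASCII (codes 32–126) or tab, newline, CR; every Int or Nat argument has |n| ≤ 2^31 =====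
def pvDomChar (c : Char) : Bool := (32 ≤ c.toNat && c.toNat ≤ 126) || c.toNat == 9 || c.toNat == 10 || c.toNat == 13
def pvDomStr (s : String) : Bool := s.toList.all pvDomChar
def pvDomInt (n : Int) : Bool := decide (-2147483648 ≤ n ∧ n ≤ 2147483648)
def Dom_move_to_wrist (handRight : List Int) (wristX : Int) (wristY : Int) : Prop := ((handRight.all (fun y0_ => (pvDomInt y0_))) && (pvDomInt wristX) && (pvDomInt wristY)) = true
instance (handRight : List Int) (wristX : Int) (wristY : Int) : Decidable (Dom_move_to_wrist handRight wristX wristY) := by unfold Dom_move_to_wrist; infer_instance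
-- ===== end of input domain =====

-- B replaces A's five passes (split into X/Y lists, two in-place subtraction loops, recombine)
-- by one pair-wise pass computing the offset once; objective: simpler. Equal return values on Pre_.


-- ===== PORT A =====
-- Literal transliteration of A.  `xs[i]` is ported as PySem.List.pyGetD xs i 0 and the in-place
-- write `xs[x] -= d` as PySem.List.pySetD: under Pre_ every access is in range, so the defaults
-- are never reached (outside Pre_ the Python raises IndexError and nothing is claimed).
-- `int(v)` on a Python int is the identity and is ported as such.
def move_to_wrist (handRight : List Int) (wristX : Int) (wristY : Int) : List Int × (List (Int × Int)) :=
  let refX := wristX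
  let refY := wristY
  let handRightX : List Int :=
    (PySem.List.pyRange 0 (PySem.List.len handRight) 2).foldl
      (fun acc x => acc ++ [PySem.List.pyGetD handRight x 0]) []
  let handRightY : List Int :=
    (PySem.List.pyRange 1 (PySem.List.len handRight) 2).foldl
      (fun acc x => acc ++ [PySem.List.pyGetD handRight x 0]) []
  let p1 : List Int := [PySem.List.pyGetD handRightX 0 0, PySem.List.pyGetD handRightY 0 0]
  let p2 : List Int := [refX, refY]
  let distanceX := PySem.List.pyGetD p1 0 0 - PySem.List.pyGetD p2 0 0
  let distanceY := PySem.List.pyGetD p1 1 0 - PySem.List.pyGetD p2 1 0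
  let handRightX2 :=
    (PySem.List.pyRange 0 (PySem.List.len handRightX) 1).foldl
      (fun xs x => PySem.List.pySetD xs x (PySem.List.pyGetD xs x 0 - distanceX)) handRightX
  let handRightY2 :=
    (PySem.List.pyRange 0 (PySem.List.len handRightY) 1).foldl
      (fun xs x => PySem.List.pySetD xs x (PySem.List.pyGetD xs x 0 - distanceY)) handRightY
  let out :=
    (PySem.List.pyRange 0 (PySem.List.len handRightX2) 1).foldl
      (fun (acc : List Int × List (Int × Int)) x =>
        (acc.1 ++ [PySem.List.pyGetD handRightX2 x 0, PySem.List.pyGetD handRightY2 x 0],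
         acc.2 ++ [(PySem.List.pyGetD handRightX2 x 0, PySem.List.pyGetD handRightY2 x 0)]))
      ([], [])
  (out.1, out.2)

-- ===== PORT B =====
-- Literal transliteration of Source B: offset once, one pass over index pairs.
def move_to_wrist_alt (handRight : List Int) (wristX : Int) (wristY : Int) : List Int × (List (Int × Int)) :=
  let dx := PySem.List.pyGetD handRight 0 0 - wristX
  let dy := PySem.List.pyGetD handRight 1 0 - wristY
  (PySem.List.pyRange 0 (PySem.List.len handRight) 2).foldl
    (fun (acc : List Int × List (Int × Int)) i =>
      let nx := PySem.List.pyGetD handRight i 0 - dx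
      let ny := PySem.List.pyGetD handRight (i + 1) 0 - dy
      (acc.1 ++ [nx, ny], acc.2 ++ [(nx, ny)]))
    ([], [])

-- ===== PRECONDITION & SPEC =====
-- Pre_ = exactly the inputs on which Python A returns: on an empty or odd-length handRight A
-- raises IndexError (handRightX[0] resp. handRightY[x] on the last pairing step); B raises there too.
def Pre_move_to_wrist (handRight : List Int) (wristX : Int) (wristY : Int) : Prop :=
  handRight ≠ [] ∧ handRight.length % 2 = 0
instance (handRight : List Int) (wristX : Int) (wristY : Int) : Decidable (Pre_move_to_wrist handRight wristX wristY) := by unfold Pre_move_to_wrist; infer_instance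
def pvWitness_move_to_wrist : List Int × Int × Int := ([10, 20, 13, 24], 3, 4)

def Spec_move_to_wrist (handRight : List Int) (wristX : Int) (wristY : Int) (out : List Int × (List (Int × Int))) : Prop := out = move_to_wrist_alt handRight wristX wristY
instance (handRight : List Int) (wristX : Int) (wristY : Int) (out : List Int × (List (Int × Int))) : Decidable (Spec_move_to_wrist handRight wristX wristY out) := by unfold Spec_move_to_wrist; infer_instance

-- ===== CLAIM (what is proved, stated in full; the proofs are below) =====
def Claim_equal_move_to_wrist : Prop := ∀ (handRight : List Int) (wristX : Int) (wristY : Int), Dom_move_to_wrist handRight wristX wristY → Pre_move_to_wrist handRight wristX wristY → Spec_move_to_wrist handRight wristX wristY (move_to_wrist handRight wristX wristY)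

-- ===== LEMMAS AND PROOFS =====

-- range(0, 2*m, 2) is the even indices below 2*m
lemma pyRange_step2_even (m : Nat) :
    PySem.List.pyRange 0 ((2 * m : Nat) : Int) 2 =
      (List.range m).map (fun k => ((2 * k : Nat) : Int)) := by
  rw [PySem.List.pyRange_of_pos 0 ((2 * m : Nat) : Int) (by norm_num)]
  have hc : (if (0 : Int) < ((2 * m : Nat) : Int) then ((((2 * m : Nat) : Int) - 0 + 2 - 1) / 2).toNat else 0) = m := by
    split <;> omega
  rw [hc]
  apply List.map_congr_left
  intro k _; push_cast; ring

-- range(1, 2*m, 2) is the odd indices below 2*m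
lemma pyRange_step2_odd (m : Nat) :
    PySem.List.pyRange 1 ((2 * m : Nat) : Int) 2 =
      (List.range m).map (fun k => ((2 * k + 1 : Nat) : Int)) := by
  rw [PySem.List.pyRange_of_pos 1 ((2 * m : Nat) : Int) (by norm_num)]
  have hc : (if (1 : Int) < ((2 * m : Nat) : Int) then ((((2 * m : Nat) : Int) - 1 + 2 - 1) / 2).toNat else 0) = m := by
    split <;> omega
  rw [hc]
  apply List.map_congr_left
  intro k _; push_cast; ring

-- the in-place subtraction loop `for x in range(k, len(xs)): xs[x] -= d`, suffix form
lemma setLoop_suffix (d : Int) (ys : List Int) (k : Nat) :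
    (PySem.List.pyRange (k : Int) ((ys.length : Nat) : Int) 1).foldl
        (fun xs x => PySem.List.pySetD xs x (PySem.List.pyGetD xs x 0 - d)) ys
      = ys.take k ++ (ys.drop k).map (fun v => v - d) := by
  by_cases hk : k < ys.length
  · have hlt : (k : Int) < ((ys.length : Nat) : Int) := by exact_mod_cast hk
    rw [PySem.List.pyRange_one_cons hlt, List.foldl_cons]
    have hstep : PySem.List.pySetD ys (k : Int) (PySem.List.pyGetD ys (k : Int) 0 - d)
        = ys.set k (ys.getD k 0 - d) := by
      rw [PySem.List.pyGetD_natCast, PySem.List.pySetD_natCast]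
    set ys' := ys.set k (ys.getD k 0 - d) with hys'
    have hlen : ys'.length = ys.length := by simp [hys']
    have hcast : (k : Int) + 1 = (((k + 1 : Nat)) : Int) := by push_cast; ring
    have ih := setLoop_suffix d ys' (k + 1)
    rw [hstep, hcast, ← hlen, ih]
    have hget : ys.getD k 0 = ys[k] := by
      simp [List.getD_eq_getElem?_getD, List.getElem?_eq_getElem hk]
    have htake : ys'.take (k + 1) = ys.take k ++ [ys[k] - d] := by
      rw [hys', hget, List.set_eq_take_append_cons_drop, if_pos hk]
      have hlt2 : (ys.take k).length = k := by simp [Nat.min_eq_left (Nat.le_of_lt hk)]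
      have h2 : k + 1 = (ys.take k).length + 1 := by rw [hlt2]
      rw [h2, List.take_append]
      simp
    have hdrop : ys'.drop (k + 1) = ys.drop (k + 1) := by
      rw [hys', List.drop_set]; simp
    have hdropk : ys.drop k = ys[k] :: ys.drop (k + 1) :=
      (List.drop_eq_getElem_cons hk)
    rw [htake, hdrop, hdropk, List.map_cons]
    simp [List.append_assoc]
  · have hge : ((ys.length : Nat) : Int) ≤ (k : Int) := by exact_mod_cast Nat.le_of_not_lt hk
    rw [PySem.List.pyRange_one_eq_nil hge, List.foldl_nil,
        List.take_of_length_le (Nat.le_of_not_lt hk), List.drop_of_length_le (Nat.le_of_not_lt hk)]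
    simp
termination_by ys.length - k

-- the whole in-place subtraction loop maps (· - d)
lemma setLoop (d : Int) (xs : List Int) :
    (PySem.List.pyRange 0 ((xs.length : Nat) : Int) 1).foldl
        (fun ys x => PySem.List.pySetD ys x (PySem.List.pyGetD ys x 0 - d)) xs
      = xs.map (fun v => v - d) := by
  have h := setLoop_suffix d xs 0
  simpa using h

-- the common shape of both output-building loops
lemma collectLoop (f g : Nat → Int) (m : Nat) (r : List Int) (p : List (Int × Int)) :
    (List.range m).foldl
        (fun (acc : List Int × List (Int × Int)) k => (acc.1 ++ [f k, g k], acc.2 ++ [(f k, g k)]))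
        (r, p)
      = (r ++ (List.range m).flatMap (fun k => [f k, g k]),
         p ++ (List.range m).map (fun k => (f k, g k))) := by
  induction m generalizing r p with
  | zero => simp
  | succ m ih => rw [List.range_succ]; simp [ih]

theorem move_to_wrist_spec : Claim_equal_move_to_wrist := by
  intro l wx wy _ hpre
  obtain ⟨hne, heven⟩ := hpre
  obtain ⟨m, hm⟩ : ∃ m, l.length = 2 * m := ⟨l.length / 2, by omega⟩
  have hmpos : 0 < m := by
    have : l.length ≠ 0 := by simpa using (List.length_eq_zero_iff.not.mpr hne)
    omega
  have hlen2 : PySem.List.len l = ((2 * m : Nat) : Int) := by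
    rw [PySem.List.len_eq, hm]
  have hX0 : (PySem.List.pyRange 0 (PySem.List.len l) 2).foldl
      (fun acc x => acc ++ [PySem.List.pyGetD l x 0]) ([] : List Int)
      = (List.range m).map (fun k => l.getD (2 * k) 0) := by
    rw [hlen2, pyRange_step2_even m,
        PySem.List.foldl_append_singleton_eq_map (fun x => PySem.List.pyGetD l x 0),
        List.map_map]
    refine List.map_congr_left (fun k _ => ?_)
    show PySem.List.pyGetD l ((2 * k : Nat) : Int) 0 = l.getD (2 * k) 0
    rw [PySem.List.pyGetD_natCast]
  have hY0 : (PySem.List.pyRange 1 (PySem.List.len l) 2).foldl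
      (fun acc x => acc ++ [PySem.List.pyGetD l x 0]) ([] : List Int)
      = (List.range m).map (fun k => l.getD (2 * k + 1) 0) := by
    rw [hlen2, pyRange_step2_odd m,
        PySem.List.foldl_append_singleton_eq_map (fun x => PySem.List.pyGetD l x 0),
        List.map_map]
    refine List.map_congr_left (fun k _ => ?_)
    show PySem.List.pyGetD l ((2 * k + 1 : Nat) : Int) 0 = l.getD (2 * k + 1) 0
    rw [PySem.List.pyGetD_natCast]
  -- closed forms
  set f : Nat → Int := fun k => l.getD (2 * k) 0 - (l.getD 0 0 - wx) with hf
  set g : Nat → Int := fun k => l.getD (2 * k + 1) 0 - (l.getD 1 0 - wy) with hg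
  have targetA : move_to_wrist l wx wy =
      ((List.range m).flatMap (fun k => [f k, g k]),
       (List.range m).map (fun k => (f k, g k))) := by
    simp only [move_to_wrist, hX0, hY0]
    set X0 : List Int := (List.range m).map (fun k => l.getD (2 * k) 0) with hX0d
    set Y0 : List Int := (List.range m).map (fun k => l.getD (2 * k + 1) 0) with hY0d
    have h1 : PySem.List.pyGetD [PySem.List.pyGetD X0 0 0, PySem.List.pyGetD Y0 0 0] 0 0
        - PySem.List.pyGetD [wx, wy] 0 0 = l.getD 0 0 - wx := by
      rw [PySem.List.pyGetD_zero_cons, PySem.List.pyGetD_zero_cons, hX0d,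
          PySem.List.pyGetD_zero, PySem.List.getD_map_range _ m 0 _ hmpos]
    have h2 : PySem.List.pyGetD [PySem.List.pyGetD X0 0 0, PySem.List.pyGetD Y0 0 0] 1 0
        - PySem.List.pyGetD [wx, wy] 1 0 = l.getD 1 0 - wy := by
      rw [PySem.List.pyGetD_ofNat' _ 1, PySem.List.pyGetD_ofNat' _ 1]
      simp only [List.getD_cons_succ, List.getD_cons_zero]
      rw [hY0d, PySem.List.pyGetD_zero, PySem.List.getD_map_range _ m 0 _ hmpos]
    simp only [h1, h2]
    have hSet1 : (PySem.List.pyRange 0 (PySem.List.len X0) 1).foldl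
        (fun xs x => PySem.List.pySetD xs x (PySem.List.pyGetD xs x 0 - (l.getD 0 0 - wx))) X0
        = (List.range m).map f := by
      rw [PySem.List.len_eq, setLoop, hX0d, List.map_map, hf]
      rfl
    have hSet2 : (PySem.List.pyRange 0 (PySem.List.len Y0) 1).foldl
        (fun xs x => PySem.List.pySetD xs x (PySem.List.pyGetD xs x 0 - (l.getD 1 0 - wy))) Y0
        = (List.range m).map g := by
      rw [PySem.List.len_eq, setLoop, hY0d, List.map_map, hg]
      rfl
    simp only [hSet1, hSet2]
    have hLenF : PySem.List.len ((List.range m).map f) = ((m : Nat) : Int) := by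
      simp [PySem.List.len_eq]
    rw [hLenF, PySem.List.pyRange_zero_natCast m, List.foldl_map]
    rw [PySem.List.foldl_congr_mem (List.range m) _
        (fun (acc : List Int × List (Int × Int)) k => (acc.1 ++ [f k, g k], acc.2 ++ [(f k, g k)]))
        ([], [])
        (by
          intro acc k hk
          simp only [List.mem_range] at hk
          simp only [PySem.List.pyGetD_natCast]
          rw [PySem.List.getD_map_range f m k _ hk, PySem.List.getD_map_range g m k _ hk])]
    rw [collectLoop f g m [] []]
    simp
  have targetB : move_to_wrist_alt l wx wy =
      ((List.range m).flatMap (fun k => [f k, g k]),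
       (List.range m).map (fun k => (f k, g k))) := by
    simp only [move_to_wrist_alt, hlen2]
    rw [pyRange_step2_even m, List.foldl_map]
    rw [PySem.List.foldl_congr_mem (List.range m) _
        (fun (acc : List Int × List (Int × Int)) k => (acc.1 ++ [f k, g k], acc.2 ++ [(f k, g k)]))
        ([], [])
        (by
          intro acc k _
          have hc2 : ((2 * k : Nat) : Int) + 1 = ((2 * k + 1 : Nat) : Int) := by push_cast; ring
          simp only [hc2, PySem.List.pyGetD_natCast, PySem.List.pyGetD_zero,
            PySem.List.pyGetD_ofNat' l 1]
          simp [hf, hg])]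
    rw [collectLoop f g m [] []]
    simp
  unfold Spec_move_to_wrist
  rw [targetA, targetB]
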